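-- pv_equiv track=rewrite | github.com/JudeBashto/Connect-4-mini-project | connect4.py | horizontalWinChecker
-- ===== SOURCE A (Python) =====
-- def lastCheckerPlayed(grid:list, column:int):
--     rowNumber=0
--     while rowNumber<=len(grid):
--         if grid[rowNumber][column]!='empty':
--             break
--         rowNumber+=1
--     return rowNumber, column  #index values, not actual column/row numbers.
--
-- def horizontalWinChecker(grid:list, column:int):
--     rowNumber, columnNumber=lastCheckerPlayed(grid, column)
--     checker=grid[rowNumber][columnNumber]
--     counter=0
--     while grid[rowNumber][columnNumber]==checker:
--         counter+=1
--         columnNumber+=1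
--         if columnNumber>=len(grid[0]):
--             break
--     rowNumber, columnNumber=lastCheckerPlayed(grid, column)
--     counter-=1                                                   #prevents double counting source location
--     while grid[rowNumber][columnNumber]==checker:
--         counter+=1
--         columnNumber-=1
--         if columnNumber<0:
--             break
--
--     return counter,checker
-- ===== SOURCE B (Python) =====
-- def lastCheckerPlayed(grid:list, column:int):
--     rowNumber=0
--     while rowNumber<=len(grid):
--         if grid[rowNumber][column]!='empty':
--             break
--         rowNumber+=1
--     return rowNumber, column  #index values, not actual column/row numbers.
--
-- def horizontalWinChecker(grid:list, column:int):
--     rowNumber, columnNumber = lastCheckerPlayed(grid, column)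
--     row = grid[rowNumber]
--     # single left-to-right pass over the row: split it into maximal runs of
--     # equal cells and return the length and value of the run covering columnNumber
--     runStart = 0
--     for i in range(1, len(row) + 1):
--         if i == len(row) or row[i] != row[runStart]:
--             if runStart <= columnNumber < i:
--                 return i - runStart, row[runStart]
--             runStart = i
-- ===== Notes on version B (the rewrite author's own statement) =====
-- stated objective: alternative
-- what changed: A expands bidirectionally from the played cell with two while-loops (right then left, subtracting 1 to avoid double counting); B makes a single left-to-right pass over the row, splitting it into maximal runs of equal cells and returning the run that covers the played column.
-- outside the precondition, e.g. on horizontalWinChecker([['x', 'x', 'x']], -1): A returns (4, 'x'), B returns None; on horizontalWinChecker([['empty', 'empty'], ['a', 'a', 'a']], 0): A returns (2, 'a'), B returns (3, 'a')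
import Mathlib
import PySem

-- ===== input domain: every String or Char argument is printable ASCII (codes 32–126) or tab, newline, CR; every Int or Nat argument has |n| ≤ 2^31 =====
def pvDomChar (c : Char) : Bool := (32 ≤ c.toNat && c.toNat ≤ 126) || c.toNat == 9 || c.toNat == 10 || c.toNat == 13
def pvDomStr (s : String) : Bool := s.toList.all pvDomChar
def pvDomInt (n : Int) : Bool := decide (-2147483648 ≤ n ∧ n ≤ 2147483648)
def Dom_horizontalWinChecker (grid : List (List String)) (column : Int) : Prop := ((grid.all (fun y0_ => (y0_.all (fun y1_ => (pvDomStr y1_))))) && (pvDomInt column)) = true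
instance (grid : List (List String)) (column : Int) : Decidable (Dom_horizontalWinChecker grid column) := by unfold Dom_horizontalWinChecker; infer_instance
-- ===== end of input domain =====

-- B replaces A's two expand-from-the-played-cell while-loops by one left-to-right pass
-- splitting the row into maximal runs of equal cells and returning the run covering the column.

-- ===== PORT A =====
-- shared helper: both Pythons contain the identical lastCheckerPlayed.
-- 'none' = the Python raises (IndexError); loop modelled with sufficient fuel (≤ len+1 iterations).
def lcpLoop (grid : List (List String)) (column : Int) : Nat → Int → Option (Int × Int)
  | 0, _ => none
  | fuel+1, row =>
    if row ≤ (grid.length : Int) then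
      match PySem.List.pyGet? grid row with
      | none => none
      | some r =>
        match PySem.List.pyGet? r column with
        | none => none
        | some cell =>
          if cell ≠ "empty" then some (row, column)
          else lcpLoop grid column fuel (row + 1)
    else some (row, column)

def lastCheckerPlayedPort (grid : List (List String)) (column : Int) : Option (Int × Int) :=
  lcpLoop grid column (grid.length + 2) 0

-- A's first while-loop: scan right while grid[r][c]==checker, break when c ≥ len(grid[0]).
-- (len(grid[0]) written grid.headD []: grid is nonempty whenever this is reached.)
def rightLoop (grid : List (List String)) (r : Int) (checker : String) : Nat → Int → Int → Option Int
  | 0, _, _ => none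
  | fuel+1, c, counter =>
    match PySem.List.pyGet? grid r with
    | none => none
    | some row =>
      match PySem.List.pyGet? row c with
      | none => none
      | some cell =>
        if cell = checker then
          if c + 1 ≥ ((grid.headD []).length : Int) then some (counter + 1)
          else rightLoop grid r checker fuel (c + 1) (counter + 1)
        else some counter

-- A's second while-loop: scan left while grid[r][c]==checker, break when c < 0.
def leftLoop (grid : List (List String)) (r : Int) (checker : String) : Nat → Int → Int → Option Int
  | 0, _, _ => none
  | fuel+1, c, counter =>
    match PySem.List.pyGet? grid r with
    | none => none
    | some row =>
      match PySem.List.pyGet? row c with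
      | none => none
      | some cell =>
        if cell = checker then
          if c - 1 < 0 then some (counter + 1)
          else leftLoop grid r checker fuel (c - 1) (counter + 1)
        else some counter

def horizontalWinChecker (grid : List (List String)) (column : Int) : Int × String :=
  match lastCheckerPlayedPort grid column with
  | none => (0, "")
  | some (r, c) =>
    match PySem.List.pyGet? grid r with
    | none => (0, "")
    | some row =>
      match PySem.List.pyGet? row c with
      | none => (0, "")
      | some checker =>
        match rightLoop grid r checker (row.length + 2) c 0 with
        | none => (0, "")
        | some cnt1 =>
          match lastCheckerPlayedPort grid column with
          | none => (0, "")
          | some (r2, c2) =>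
            match leftLoop grid r2 checker (row.length + 2) c2 (cnt1 - 1) with
            | none => (0, "")
            | some cnt2 => (cnt2, checker)

-- ===== PORT B =====
-- B's for-loop: i runs over 1..len(row); runStart tracks the start of the current maximal run;
-- returns the run covering columnNumber (falls through, i.e. junk, only for out-of-range columns).
def runLoop (row : List String) (c : Int) (runStart i : Nat) : Option (Int × String) :=
  if i ≤ row.length then
    if i = row.length ∨ row.getD i "" ≠ row.getD runStart "" then
      if (runStart : Int) ≤ c ∧ c < (i : Int) then
        some ((i : Int) - (runStart : Int), row.getD runStart "")
      else runLoop row c i (i + 1)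
    else runLoop row c runStart (i + 1)
  else none
termination_by row.length + 1 - i
decreasing_by all_goals omega

def horizontalWinChecker_alt (grid : List (List String)) (column : Int) : Int × String :=
  match lastCheckerPlayedPort grid column with
  | none => (0, "")
  | some (r, c) =>
    match PySem.List.pyGet? grid r with
    | none => (0, "")
    | some row => (runLoop row c 0 1).getD (0, "")

-- ===== PRECONDITION & SPEC =====
-- Pre_ restricts to the game's natural domain: nonempty grid, non-negative in-range column
-- (A wraps a negative column around the row, an indexing artefact), and either the top cell of
-- the column holds a checker (only row 0 is ever touched) or the grid is rectangular with some
-- checker in the column (on ragged grids A raises or caps the scan by the width of a DIFFERENT row).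
def Pre_horizontalWinChecker (grid : List (List String)) (column : Int) : Prop :=
  grid ≠ [] ∧ 0 ≤ column ∧ column < ((grid.headD []).length : Int) ∧
    ((grid.headD []).getD column.toNat "" ≠ "empty" ∨
      ((∀ row ∈ grid, row.length = (grid.headD []).length) ∧
        ∃ row ∈ grid, row.getD column.toNat "" ≠ "empty"))
instance (grid : List (List String)) (column : Int) : Decidable (Pre_horizontalWinChecker grid column) := by
  unfold Pre_horizontalWinChecker; infer_instance

def pvWitness_horizontalWinChecker : List (List String) × Int :=
  ([["empty", "x"], ["o", "o"]], 1)

def Spec_horizontalWinChecker (grid : List (List String)) (column : Int) (out : Int × String) : Prop := out = horizontalWinChecker_alt grid column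
instance (grid : List (List String)) (column : Int) (out : Int × String) : Decidable (Spec_horizontalWinChecker grid column out) := by unfold Spec_horizontalWinChecker; infer_instance

-- ===== CLAIM (what is proved, stated in full; the proofs are below) =====
def Claim_equal_horizontalWinChecker : Prop := ∀ (grid : List (List String)) (column : Int), Dom_horizontalWinChecker grid column → Pre_horizontalWinChecker grid column → Spec_horizontalWinChecker grid column (horizontalWinChecker grid column)

-- ===== LEMMAS AND PROOFS =====

theorem pvWitness_ok :
    Dom_horizontalWinChecker pvWitness_horizontalWinChecker.1 pvWitness_horizontalWinChecker.2 ∧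
    Pre_horizontalWinChecker pvWitness_horizontalWinChecker.1 pvWitness_horizontalWinChecker.2 := by
  constructor <;> decide


-- pyGet? at an in-range natural index, phrased with getD
theorem pyGet_getD {α : Type} (xs : List α) (n : Nat) (d : α) (h : n < xs.length) :
    PySem.List.pyGet? xs (n : Int) = some (xs.getD n d) := by
  rw [PySem.List.pyGet?_natCast, List.getElem?_eq_getElem h]
  simp [List.getD, List.getElem?_eq_getElem h]

-- lastCheckerPlayed finds the first row whose cell in the column is not "empty"
-- (rectangular case: all rows have width W and some row is non-empty in the column).
theorem lcp_find (grid : List (List String)) (c0 W : Nat)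
    (hrect : ∀ row ∈ grid, row.length = W) (hc0 : c0 < W) :
    ∀ (fuel i : Nat), grid.length - i + 1 ≤ fuel →
      (∃ j, i ≤ j ∧ j < grid.length ∧ (grid.getD j []).getD c0 "" ≠ "empty") →
      ∃ r : Nat, i ≤ r ∧ r < grid.length ∧
        lcpLoop grid (c0 : Int) fuel (i : Int) = some ((r : Int), (c0 : Int)) ∧
        (grid.getD r []).getD c0 "" ≠ "empty" := by
  intro fuel
  induction fuel with
  | zero => intro i hf h; omega
  | succ fuel ih =>
    intro i hf h
    obtain ⟨j, hij, hjlen, hj⟩ := h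
    have hilen : i < grid.length := by omega
    have hrowi : PySem.List.pyGet? grid (i : Int) = some (grid.getD i []) :=
      pyGet_getD grid i [] hilen
    have hleni : (grid.getD i []).length = W := by
      apply hrect
      have : grid.getD i [] = grid[i] := by simp [List.getD, List.getElem?_eq_getElem hilen]
      rw [this]; exact List.getElem_mem hilen
    have hcell : PySem.List.pyGet? (grid.getD i []) (c0 : Int) = some ((grid.getD i []).getD c0 "") :=
      pyGet_getD _ c0 "" (by omega)
    rw [lcpLoop]
    have hle : (i : Int) ≤ (grid.length : Int) := by exact_mod_cast Nat.le_of_lt hilen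
    rw [if_pos hle]
    simp only [hrowi, hcell]
    by_cases hne : (grid.getD i []).getD c0 "" ≠ "empty"
    · rw [if_pos hne]
      exact ⟨i, le_refl i, hilen, rfl, hne⟩
    · rw [if_neg hne]
      push_neg at hne
      have hji : j ≠ i := by intro he; rw [he] at hj; exact hj hne
      have : ((i : Int) + 1) = ((i + 1 : Nat) : Int) := by push_cast; ring
      rw [this]
      obtain ⟨r, hir, hrlen, heq, hr⟩ := ih (i + 1) (by omega) ⟨j, by omega, hjlen, hj⟩
      exact ⟨r, by omega, hrlen, heq, hr⟩

-- A's right loop: counts e - c cells given the run structure [s, e) around the column.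
theorem rightLoop_eq (grid : List (List String)) (r : Int) (row : List String)
    (hrow : PySem.List.pyGet? grid r = some row)
    (hw : (grid.headD []).length = row.length)
    (checker : String) (s e : Nat)
    (he : e ≤ row.length)
    (hrun : ∀ j, s ≤ j → j < e → row.getD j "" = checker)
    (hright : e = row.length ∨ row.getD e "" ≠ checker) :
    ∀ (fuel c : Nat) (counter : Int), s ≤ c → c ≤ e → c < row.length → e - c < fuel →
      rightLoop grid r checker fuel (c : Int) counter = some (counter + ((e : Int) - (c : Int))) := by
  intro fuel
  induction fuel with
  | zero => intro c counter _ _ _ hf; omega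
  | succ fuel ih =>
    intro c counter hsc hce hclen hf
    have hcell : PySem.List.pyGet? row (c : Int) = some (row.getD c "") :=
      pyGet_getD row c "" hclen
    rw [rightLoop]
    simp only [hrow, hcell]
    by_cases hceq : c = e
    · subst hceq
      have hne : row.getD c "" ≠ checker := by
        rcases hright with h | h
        · omega
        · exact h
      rw [if_neg hne]
      simp
    · have hclt : c < e := by omega
      have heq : row.getD c "" = checker := hrun c hsc hclt
      rw [if_pos heq]
      by_cases hbreak : (c : Int) + 1 ≥ ((grid.headD []).length : Int)
      · rw [if_pos hbreak]
        have : e = c + 1 := by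
          rw [hw] at hbreak
          have : row.length ≤ c + 1 := by exact_mod_cast hbreak
          omega
        rw [this]
        congr 1
        push_cast
        ring
      · rw [if_neg hbreak]
        have hlt : c + 1 < row.length := by
          rw [hw] at hbreak
          push_neg at hbreak
          exact_mod_cast hbreak
        have : (c : Int) + 1 = ((c + 1 : Nat) : Int) := by push_cast; ring
        rw [this, ih (c + 1) (counter + 1) (by omega) (by omega) hlt (by omega)]
        congr 1
        push_cast
        ring

-- A's left loop: counts c - s + 1 more cells (0 when already left of the run).
theorem leftLoop_eq (grid : List (List String)) (r : Int) (row : List String)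
    (hrow : PySem.List.pyGet? grid r = some row)
    (checker : String) (s e : Nat)
    (he : e ≤ row.length)
    (hrun : ∀ j, s ≤ j → j < e → row.getD j "" = checker)
    (hleft : s = 0 ∨ row.getD (s - 1) "" ≠ checker) :
    ∀ (fuel : Nat) (c counter : Int), 0 ≤ c → (s : Int) - 1 ≤ c → c < (e : Int) →
      c.toNat + 2 ≤ fuel →
      leftLoop grid r checker fuel c counter = some (counter + (c - (s : Int)) + 1) := by
  intro fuel
  induction fuel with
  | zero => intro c counter _ _ _ hf; omega
  | succ fuel ih =>
    intro c counter hc0 hsc hce hf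
    have hclen : c < (row.length : Int) := by
      have : (e : Int) ≤ (row.length : Int) := by exact_mod_cast he
      omega
    have hcnat : c = ((c.toNat : Nat) : Int) := by omega
    have hcltn : c.toNat < row.length := by omega
    have hcell : PySem.List.pyGet? row c = some (row.getD c.toNat "") := by
      rw [hcnat]; exact pyGet_getD row c.toNat "" hcltn
    rw [leftLoop]
    simp only [hrow, hcell]
    by_cases hcs : (s : Int) ≤ c
    · have heq : row.getD c.toNat "" = checker := by
        apply hrun <;> omega
      rw [if_pos heq]
      by_cases hbreak : c - 1 < 0
      · rw [if_pos hbreak]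
        have hc0' : c = 0 := by omega
        have hs0 : s = 0 := by omega
        rw [hc0', hs0]
        congr 1
        push_cast
        ring
      · rw [if_neg hbreak]
        rw [ih (c - 1) (counter + 1) (by omega) (by omega) (by omega) (by omega)]
        congr 1
        ring
    · -- c = s - 1: the cell left of the run differs from checker
      have hs1 : 1 ≤ s := by omega
      have hcs1 : c.toNat = s - 1 := by omega
      have hne : row.getD c.toNat "" ≠ checker := by
        rw [hcs1]
        rcases hleft with h | h
        · omega
        · exact h
      rw [if_neg hne]
      congr 1
      have : c = (s : Int) - 1 := by omega
      rw [this]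
      ring

-- B's loop: returns the maximal run [s, e) covering the column, with its structural facts.
theorem runLoop_eq (row : List String) (c0 : Nat) (hc0 : c0 < row.length) :
    ∀ (k i runStart : Nat), row.length - i ≤ k → runStart < i → i ≤ row.length → runStart ≤ c0 →
      (∀ j, runStart ≤ j → j < i → row.getD j "" = row.getD runStart "") →
      (runStart = 0 ∨ row.getD (runStart - 1) "" ≠ row.getD runStart "") →
      ∃ s e : Nat, runLoop row (c0 : Int) runStart i = some ((e : Int) - (s : Int), row.getD s "") ∧
        s ≤ c0 ∧ c0 < e ∧ e ≤ row.length ∧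
        (∀ j, s ≤ j → j < e → row.getD j "" = row.getD s "") ∧
        (s = 0 ∨ row.getD (s - 1) "" ≠ row.getD s "") ∧
        (e = row.length ∨ row.getD e "" ≠ row.getD s "") := by
  intro k
  induction k with
  | zero =>
    intro i runStart hk hri hilen hrc hall hlmax
    -- i = row.length: the loop condition holds and the current run must end here
    have hieq : i = row.length := by omega
    rw [runLoop, if_pos hilen, if_pos (Or.inl hieq)]
    have hcov : (runStart : Int) ≤ (c0 : Int) ∧ (c0 : Int) < (i : Int) := by
      constructor <;> exact_mod_cast (by omega : _)
    rw [if_pos hcov]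
    exact ⟨runStart, i, rfl, hrc, by omega, by omega, hall, hlmax, Or.inl hieq⟩
  | succ k ih =>
    intro i runStart hk hri hilen hrc hall hlmax
    rw [runLoop, if_pos hilen]
    by_cases hend : i = row.length ∨ row.getD i "" ≠ row.getD runStart ""
    · rw [if_pos hend]
      by_cases hcov : (runStart : Int) ≤ (c0 : Int) ∧ (c0 : Int) < (i : Int)
      · rw [if_pos hcov]
        have hci : c0 < i := by exact_mod_cast hcov.2
        exact ⟨runStart, i, rfl, hrc, hci, hilen, hall, hlmax, hend⟩
      · rw [if_neg hcov]
        -- the run [runStart, i) does not cover c0, so i ≤ c0 < row.length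
        have hic : i ≤ c0 := by
          by_contra hlt
          exact hcov ⟨by exact_mod_cast hrc, by exact_mod_cast (by omega : c0 < i)⟩
        have hilt : i < row.length := by omega
        have hne : row.getD i "" ≠ row.getD runStart "" := by
          rcases hend with h | h
          · omega
          · exact h
        obtain ⟨s, e, heq, h1, h2, h3, h4, h5, h6⟩ :=
          ih (i + 1) i (by omega) (by omega) (by omega) hic
            (by intro j h1 h2; have : j = i := by omega
                rw [this])
            (by right
                have hprev : row.getD (i - 1) "" = row.getD runStart "" :=
                  hall (i - 1) (by omega) (by omega)
                rw [hprev]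
                exact fun h => hne h.symm)
        exact ⟨s, e, heq, h1, h2, h3, h4, h5, h6⟩
    · rw [if_neg hend]
      push_neg at hend
      obtain ⟨hine, hieq⟩ := hend
      have hilt : i < row.length := by omega
      obtain ⟨s, e, heq, h1, h2, h3, h4, h5, h6⟩ :=
        ih (i + 1) runStart (by omega) (by omega) (by omega) hrc
          (by intro j hj1 hj2
              by_cases hji : j = i
              · rw [hji]; exact hieq
              · exact hall j hj1 (by omega))
          hlmax
      exact ⟨s, e, heq, h1, h2, h3, h4, h5, h6⟩

-- main assembly: from Pre_, locate the played row, get B's run facts, evaluate A's two loops.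
theorem main_eq (grid : List (List String)) (column : Int)
    (hpre : Pre_horizontalWinChecker grid column) :
    horizontalWinChecker grid column = horizontalWinChecker_alt grid column := by
  obtain ⟨hne, hc0, hcw, hcase⟩ := hpre
  set c0 : Nat := column.toNat with hc0def
  have hcol : column = (c0 : Int) := by omega
  -- step 1: lastCheckerPlayed returns some row index r with the needed facts
  have hmain : ∃ r : Nat, r < grid.length ∧
      lastCheckerPlayedPort grid column = some ((r : Int), column) ∧
      (grid.getD r []).length = (grid.headD []).length ∧
      c0 < (grid.getD r []).length := by
    rcases hcase with htop | ⟨hrect, j, hj, hjne⟩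
    · -- top cell non-empty: r = 0
      refine ⟨0, by cases grid with | nil => exact absurd rfl hne | cons a l => simp, ?_, ?_, ?_⟩
      · unfold lastCheckerPlayedPort
        rw [lcpLoop]
        have h0 : (0 : Int) ≤ (grid.length : Int) := by positivity
        rw [if_pos h0]
        have hrow0 : PySem.List.pyGet? grid (0 : Int) = some (grid.headD []) := by
          cases grid with
          | nil => exact absurd rfl hne
          | cons a l => simp
        rw [hrow0]
        have hcl : c0 < (grid.headD []).length := by omega
        have hcell : PySem.List.pyGet? (grid.headD []) column = some ((grid.headD []).getD c0 "") := by
          rw [hcol]; exact pyGet_getD _ c0 "" hcl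
        simp only [hcell, if_pos htop]
        norm_num
      · cases grid with
        | nil => exact absurd rfl hne
        | cons a l => simp [List.getD]
      · cases grid with
        | nil => exact absurd rfl hne
        | cons a l =>
          have hga : (List.getD (a :: l) 0 ([] : List String)) = a := by simp [List.getD]
          rw [hga]
          simp only [List.headD] at hcw
          omega
    · -- rectangular case: use lcp_find
      obtain ⟨ji, hji, hjval⟩ := List.mem_iff_getElem.mp hj
      have hjd : grid.getD ji [] = j := by simp [List.getD, List.getElem?_eq_getElem hji, hjval]
      have hc0W : c0 < (grid.headD []).length := by omega
      obtain ⟨r, _, hrlen, heq, hrne⟩ :=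
        lcp_find grid c0 (grid.headD []).length hrect hc0W (grid.length + 2) 0 (by omega)
          ⟨ji, by omega, hji, by rw [hjd]; exact hjne⟩
      refine ⟨r, hrlen, ?_, ?_, ?_⟩
      · unfold lastCheckerPlayedPort
        rw [hcol]
        exact_mod_cast heq
      · apply hrect
        have : grid.getD r [] = grid[r] := by simp [List.getD, List.getElem?_eq_getElem hrlen]
        rw [this]; exact List.getElem_mem hrlen
      · have : (grid.getD r []).length = (grid.headD []).length := by
          apply hrect
          have : grid.getD r [] = grid[r] := by simp [List.getD, List.getElem?_eq_getElem hrlen]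
          rw [this]; exact List.getElem_mem hrlen
        omega
  obtain ⟨r, hrlen, hlcp, hrowW, hc0len⟩ := hmain
  set row : List String := grid.getD r [] with hrowdef
  have hrowget : PySem.List.pyGet? grid (r : Int) = some row :=
    pyGet_getD grid r [] hrlen
  have hcell : PySem.List.pyGet? row column = some (row.getD c0 "") := by
    rw [hcol]; exact pyGet_getD row c0 "" hc0len
  -- step 2: B's run facts
  obtain ⟨s, e, hrunloop, hsc, hce, helen, hrun, hlmax, hrmax⟩ :=
    runLoop_eq row c0 hc0len (row.length) 1 0 (by omega) (by omega) (by omega) (by omega)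
      (by intro j h1 h2; have : j = 0 := by omega
          rw [this]) (Or.inl rfl)
  have hchk : row.getD c0 "" = row.getD s "" := hrun c0 hsc hce
  -- step 3: evaluate both ports
  unfold horizontalWinChecker horizontalWinChecker_alt
  simp only [hlcp, hrowget, hcell]
  have hright := rightLoop_eq grid (r : Int) row hrowget hrowW.symm (row.getD c0 "") s e helen
    (by intro j h1 h2; rw [hrun j h1 h2, hchk])
    (by rcases hrmax with h | h
        · exact Or.inl h
        · right; rw [hchk]; exact h)
    (row.length + 2) c0 0 hsc (by omega) hc0len (by omega)
  rw [hcol]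
  simp only [hright]
  have hleft := leftLoop_eq grid (r : Int) row hrowget (row.getD c0 "") s e helen
    (by intro j h1 h2; rw [hrun j h1 h2, hchk])
    (by rcases hlmax with h | h
        · exact Or.inl h
        · right; rw [hchk]; exact h)
    (row.length + 2) (c0 : Int) (0 + ((e : Int) - (c0 : Int)) - 1)
    (by omega) (by omega) (by exact_mod_cast hce) (by omega)
  simp only [hleft, hrunloop]
  simp only [Option.getD_some]
  rw [Prod.mk.injEq]
  exact ⟨by push_cast; ring, hchk⟩
  
-- ===== VERDICT (by name: the statement is the Claim_ definition above) =====
theorem horizontalWinChecker_spec : Claim_equal_horizontalWinChecker := by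
  intro grid column _ hpre
  unfold Spec_horizontalWinChecker
  exact main_eq grid column hpre
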